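-- pv_equiv track=rewrite | github.com/philarena1/simulations_stat | baseball/season_possibilities.py | wins_per_team
-- ===== SOURCE A (Python) =====
-- def wins_per_team(universe,contending_teams):
--     wins = []
--     for game in universe:
--         team = (game.split('-')[0]).strip()
--         outcome = universe[game]
--
--         for t in contending_teams:
--             if t == team and outcome == 'W':
--                 wins.append(t)
--
--     wins_per = {}
--     for win in wins:
--         wins_per[win] = wins.count(win)
--
--     return wins_per
-- ===== SOURCE B (Python) =====
-- def wins_per_team(universe, contending_teams):
--     # One pass: count wins directly in a dict instead of building a wins list
--     # and rescanning it with list.count for every element (O(W^2) -> O(W)).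
--     counts = {}
--     for game, outcome in universe.items():
--         if outcome == 'W':
--             team = game.split('-')[0].strip()
--             for t in contending_teams:
--                 if t == team:
--                     counts[t] = counts.get(t, 0) + 1
--     return counts
-- ===== Notes on version B (the rewrite author's own statement) =====
-- stated objective: faster
-- what changed: Instead of materialising a wins list and then calling wins.count(win) for every element (a quadratic rescan), B counts wins directly into a dict in a single pass over the games.
import Mathlib
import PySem

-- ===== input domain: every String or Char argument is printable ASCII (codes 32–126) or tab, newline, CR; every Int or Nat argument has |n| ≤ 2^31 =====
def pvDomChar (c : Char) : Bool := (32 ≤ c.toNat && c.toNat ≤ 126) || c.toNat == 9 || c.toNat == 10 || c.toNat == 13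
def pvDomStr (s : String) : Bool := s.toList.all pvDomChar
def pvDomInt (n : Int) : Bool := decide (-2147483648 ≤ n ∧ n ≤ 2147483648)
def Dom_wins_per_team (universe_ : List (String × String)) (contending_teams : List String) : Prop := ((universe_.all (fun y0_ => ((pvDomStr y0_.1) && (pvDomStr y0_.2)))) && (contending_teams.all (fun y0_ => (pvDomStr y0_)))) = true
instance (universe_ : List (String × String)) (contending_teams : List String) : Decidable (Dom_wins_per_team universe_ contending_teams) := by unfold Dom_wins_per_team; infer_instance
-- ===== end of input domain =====

-- B replaces A's wins list + per-element wins.count(win) rescan by a single counting pass into a dict.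

-- ===== PORT A =====
-- game.split('-')[0].strip() — identical line in both Pythons ([0] on split('-') never raises: the list is nonempty)
def pvTeamOf (game : String) : String :=
  PySem.Str.strip (PySem.List.pyGetD ((PySem.Str.split? game "-").getD []) 0 "")

def wins_per_team (universe_ : List (String × String)) (contending_teams : List String) : List (String × Int) :=
  let wins := universe_.foldl (fun wins gv =>
      let team := pvTeamOf gv.1
      let outcome := ((PySem.Dict.mk universe_).get? gv.1).getD ""   -- universe[game]; the key is always present
      contending_teams.foldl (fun wins t =>
        if t == team && outcome == "W" then wins ++ [t] else wins) wins) []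
  (wins.foldl (fun wp win => wp.insert win ((wins.count win : Int))) PySem.Dict.empty).items

-- ===== PORT B =====
def wins_per_team_alt (universe_ : List (String × String)) (contending_teams : List String) : List (String × Int) :=
  (universe_.foldl (fun counts gv =>
      if gv.2 == "W" then
        let team := pvTeamOf gv.1
        contending_teams.foldl (fun counts t =>
          if t == team then counts.insert t (counts.getD t 0 + 1) else counts) counts
      else counts) PySem.Dict.empty).items

-- ===== PRECONDITION & SPEC =====
-- Pre_ excludes association lists with duplicate keys: those do not represent any Python dict
-- (dict construction collapses duplicates), so neither port's behaviour there is Python's.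
def Pre_wins_per_team (universe_ : List (String × String)) (contending_teams : List String) : Prop :=
  (universe_.map Prod.fst).Nodup

instance (universe_ : List (String × String)) (contending_teams : List String) : Decidable (Pre_wins_per_team universe_ contending_teams) := by unfold Pre_wins_per_team; infer_instance

def pvWitness_wins_per_team : (List (String × String)) × List String :=
  ([("NYY - 4/1", "W"), ("BOS - 4/1", "L"), ("NYY - 4/2", "W")], ["NYY", "BOS"])

def Spec_wins_per_team (universe_ : List (String × String)) (contending_teams : List String) (out : List (String × Int)) : Prop := out = wins_per_team_alt universe_ contending_teams
instance (universe_ : List (String × String)) (contending_teams : List String) (out : List (String × Int)) : Decidable (Spec_wins_per_team universe_ contending_teams out) := by unfold Spec_wins_per_team; infer_instance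

-- ===== CLAIM (what is proved, stated in full; the proofs are below) =====
def Claim_equal_wins_per_team : Prop := ∀ (universe_ : List (String × String)) (contending_teams : List String), Dom_wins_per_team universe_ contending_teams → Pre_wins_per_team universe_ contending_teams → Spec_wins_per_team universe_ contending_teams (wins_per_team universe_ contending_teams)

-- ===== LEMMAS AND PROOFS =====

-- the wins contributed by one game (team, outcome) pair
def pvSeg (ct : List String) (gv : String × String) : List String :=
  if gv.2 == "W" then ct.filter (fun t => t == pvTeamOf gv.1) else []

-- A's inner loop over contending_teams appends exactly pvSeg ct gv (once outcome = gv.2)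
theorem pv_inner_append (ct : List String) (gv : String × String) (wins : List String) :
    ct.foldl (fun wins t =>
        if t == pvTeamOf gv.1 && gv.2 == "W" then wins ++ [t] else wins) wins
      = wins ++ pvSeg ct gv := by
  by_cases h : gv.2 = "W"
  · simp only [pvSeg, h, beq_self_eq_true, Bool.and_true, if_true]
    exact PySem.List.foldl_append_if_eq_filter _ ct wins
  · have hb : (gv.2 == "W") = false := by simp [h]
    simp [pvSeg, hb]

-- under Nodup keys, looking the key back up returns the pair's own value
theorem pv_lookup (u : List (String × String)) (gv : String × String)
    (hnd : (u.map Prod.fst).Nodup) (hmem : gv ∈ u) :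
    ((PySem.Dict.mk u).get? gv.1).getD "" = gv.2 := by
  have : (PySem.Dict.mk u).get? gv.1 = some gv.2 := by
    apply PySem.Dict.get?_of_mem_items
    · exact hmem
    · exact hnd
  rw [this]; rfl

-- A's wins list is the concatenation of the per-game segments
theorem pv_wins_eq (u : List (String × String)) (ct : List String)
    (hnd : (u.map Prod.fst).Nodup) :
    u.foldl (fun wins gv =>
        ct.foldl (fun wins t =>
          if t == pvTeamOf gv.1 && (((PySem.Dict.mk u).get? gv.1).getD "") == "W"
          then wins ++ [t] else wins) wins) []
      = u.flatMap (pvSeg ct) := by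
  have h1 : u.foldl (fun wins gv =>
        ct.foldl (fun wins t =>
          if t == pvTeamOf gv.1 && (((PySem.Dict.mk u).get? gv.1).getD "") == "W"
          then wins ++ [t] else wins) wins) []
      = u.foldl (fun wins gv => wins ++ pvSeg ct gv) [] := by
    apply PySem.List.foldl_congr_mem
    intro wins gv hmem
    rw [pv_lookup u gv hnd hmem]
    exact pv_inner_append ct gv wins
  rw [h1, PySem.List.foldl_append_eq_flatMap]
  simp

-- a loop 'd[w] = f(w)' over l from a canonical dict stays canonical
theorem pv_insert_fn_aux (f : String → Int) (l : List String) : ∀ (seen : List String),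
    l.foldl (fun d w => d.insert w (f w))
        (PySem.Dict.mk ((PySem.Set.ofList seen).map (fun k => (k, f k))))
      = PySem.Dict.mk ((PySem.Set.ofList (seen ++ l)).map (fun k => (k, f k))) := by
  induction l with
  | nil => intro seen; simp
  | cons w l' ih =>
    intro seen
    have hofw : PySem.Set.ofList (seen ++ [w]) = PySem.Set.add (PySem.Set.ofList seen) w := by
      rw [PySem.Set.ofList_eq_foldl, List.foldl_append, ← PySem.Set.ofList_eq_foldl]
      rfl
    have hstep : (PySem.Dict.mk ((PySem.Set.ofList seen).map (fun k => (k, f k)))).insert w (f w)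
        = PySem.Dict.mk ((PySem.Set.ofList (seen ++ [w])).map (fun k => (k, f k))) := by
      apply PySem.Dict.ext
      rw [PySem.Dict.items_insert, hofw]
      by_cases hw : w ∈ PySem.Set.ofList seen
      · have hc : (PySem.Dict.mk ((PySem.Set.ofList seen).map (fun k => (k, f k)))).contains w = true := by
          rw [PySem.Dict.contains_eq_decide_mem_keys]
          simp only [PySem.Dict.keys_mk, List.map_map]
          simp [Function.comp, PySem.Set.mem_ofList, (PySem.Set.mem_ofList seen w).mp hw]
        have hadd : PySem.Set.add (PySem.Set.ofList seen) w = PySem.Set.ofList seen := by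
          simp [PySem.Set.add_of_mem hw]
        rw [hc, hadd]
        simp only [if_true, List.map_map]
        apply List.map_congr_left
        intro k _
        by_cases hkw : k = w
        · subst hkw; simp
        · simp [Function.comp, hkw]
      · have hc : (PySem.Dict.mk ((PySem.Set.ofList seen).map (fun k => (k, f k)))).contains w = false := by
          rw [PySem.Dict.contains_eq_decide_mem_keys]
          simp only [PySem.Dict.keys_mk, List.map_map]
          simp [Function.comp, PySem.Set.mem_ofList]
          exact fun hmem => hw ((PySem.Set.mem_ofList seen w).mpr hmem)
        have hadd : PySem.Set.add (PySem.Set.ofList seen) w = PySem.Set.ofList seen ++ [w] := by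
          simp [PySem.Set.add_of_not_mem hw]
        rw [hc, hadd]
        simp
    calc (w :: l').foldl (fun d w => d.insert w (f w))
            (PySem.Dict.mk ((PySem.Set.ofList seen).map (fun k => (k, f k))))
        = l'.foldl (fun d w => d.insert w (f w))
            (PySem.Dict.mk ((PySem.Set.ofList (seen ++ [w])).map (fun k => (k, f k)))) := by
          simp [List.foldl_cons, hstep]
      _ = PySem.Dict.mk ((PySem.Set.ofList ((seen ++ [w]) ++ l')).map (fun k => (k, f k))) := ih _
      _ = PySem.Dict.mk ((PySem.Set.ofList (seen ++ w :: l')).map (fun k => (k, f k))) := by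
          simp

-- A's aggregation dict, as items
theorem pv_A_items (f : String → Int) (l : List String) :
    (l.foldl (fun d w => d.insert w (f w)) PySem.Dict.empty).items
      = (PySem.Set.ofList l).map (fun k => (k, f k)) := by
  have h := pv_insert_fn_aux f l []
  simpa using congrArg PySem.Dict.items h

-- B's loop = counter of the concatenated segments
theorem pv_B_counter (ct : List String) (u : List (String × String)) :
    u.foldl (fun counts gv =>
        if gv.2 == "W" then
          ct.foldl (fun counts t =>
            if t == pvTeamOf gv.1 then counts.insert t (counts.getD t 0 + 1) else counts) counts
        else counts) PySem.Dict.empty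
      = PySem.Dict.counter (u.flatMap (pvSeg ct)) := by
  have hinner : ∀ (gv : String × String) (counts : PySem.Dict String Int),
      (if gv.2 == "W" then
        ct.foldl (fun counts t =>
          if t == pvTeamOf gv.1 then counts.insert t (counts.getD t 0 + 1) else counts) counts
      else counts)
      = (pvSeg ct gv).foldl (fun d x => d.insert x (d.getD x 0 + 1)) counts := by
    intro gv counts
    by_cases h : gv.2 = "W"
    · have hb : (gv.2 == "W") = true := by simp [h]
      simp only [pvSeg, hb, if_true, List.foldl_filter]
    · have hb : (gv.2 == "W") = false := by simp [h]
      simp [pvSeg, hb]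
  have hflat : ∀ (l : List (String × String)) (d : PySem.Dict String Int),
      l.foldl (fun (d : PySem.Dict String Int) gv =>
          (pvSeg ct gv).foldl (fun d x => d.insert x (d.getD x 0 + 1)) d) d
        = (l.flatMap (pvSeg ct)).foldl (fun d x => d.insert x (d.getD x 0 + 1)) d := by
    intro l
    induction l with
    | nil => intro d; rfl
    | cons gv l' ih => intro d; simp [List.foldl_append, ih]
  calc u.foldl (fun counts gv =>
        if gv.2 == "W" then
          ct.foldl (fun counts t =>
            if t == pvTeamOf gv.1 then counts.insert t (counts.getD t 0 + 1) else counts) counts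
        else counts) PySem.Dict.empty
      = u.foldl (fun (d : PySem.Dict String Int) gv =>
            (pvSeg ct gv).foldl (fun d x => d.insert x (d.getD x 0 + 1)) d)
          PySem.Dict.empty := by
        apply PySem.List.foldl_congr_mem
        intro d gv _
        exact hinner gv d
    _ = (u.flatMap (pvSeg ct)).foldl
          (fun (d : PySem.Dict String Int) x => d.insert x (d.getD x 0 + 1))
          PySem.Dict.empty :=
        hflat u _
    _ = PySem.Dict.counter (u.flatMap (pvSeg ct)) :=
        PySem.Dict.foldl_insert_getD_add_one_eq_counter _

-- ===== VERDICT (by name: the statement is the Claim_ definition above) =====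
theorem wins_per_team_spec : Claim_equal_wins_per_team := by
  intro u ct _ hpre
  unfold Spec_wins_per_team wins_per_team wins_per_team_alt
  rw [pv_wins_eq u ct hpre, pv_B_counter ct u, pv_A_items]
  rw [PySem.Dict.items_counter]
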